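-- pv_equiv track=rewrite | github.com/gcheng9430/InterviewPrep | Guo/29mock.py | solution
-- ===== SOURCE A (Python) =====
-- def solution(searchWord,resultWord):
--     m = len(searchWord)
--     n = len(resultWord)
--     ptr = 0
--     #iterate search Word and match as many char in resultWord as Possible
--     for i in range(m):
--         #has matched all of resultWord, no need to add
--         if ptr ==n:
--             return 0
--         if searchWord[i]==resultWord[ptr]:
--             ptr +=1
--     #add rest of  resultWord
--     return n-ptr
-- ===== SOURCE B (Python) =====
-- def solution(searchWord, resultWord):
--     # Index searchWord once: for every char, the ascending list of its positions;
--     # then walk resultWord, binary-searching the next usable position.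
--     positions = {}
--     for i, c in enumerate(searchWord):
--         positions.setdefault(c, []).append(i)
--     pos = 0
--     n = len(resultWord)
--     for i, ch in enumerate(resultWord):
--         lst = positions.get(ch, [])
--         # bisect_left(lst, pos) written out (no imports): first index with lst[lo] >= pos
--         lo, hi = 0, len(lst)
--         while lo < hi:
--             mid = (lo + hi) // 2
--             if lst[mid] < pos:
--                 lo = mid + 1
--             else:
--                 hi = mid
--         if lo == len(lst):
--             return n - i
--         pos = lst[lo] + 1
--     return 0
-- ===== Notes on version B (the rewrite author's own statement) =====
-- stated objective: alternative
-- what changed: B first builds a char -> sorted-positions index of searchWord in one pass, then matches resultWord by binary-searching each char's position list for the next usable position, instead of A's single greedy pointer scan over searchWord.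
import Mathlib
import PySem

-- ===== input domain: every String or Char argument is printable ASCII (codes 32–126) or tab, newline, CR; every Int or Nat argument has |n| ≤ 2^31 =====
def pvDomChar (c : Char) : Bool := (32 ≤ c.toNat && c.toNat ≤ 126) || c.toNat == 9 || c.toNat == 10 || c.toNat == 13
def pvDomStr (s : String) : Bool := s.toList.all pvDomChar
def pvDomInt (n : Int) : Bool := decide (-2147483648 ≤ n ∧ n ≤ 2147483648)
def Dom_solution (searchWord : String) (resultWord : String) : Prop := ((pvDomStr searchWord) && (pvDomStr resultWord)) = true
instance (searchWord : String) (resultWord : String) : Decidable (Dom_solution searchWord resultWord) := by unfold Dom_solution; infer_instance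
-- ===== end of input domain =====

-- B replaces A's single greedy pointer scan over searchWord by an alternative algorithm:
-- it builds a char -> ascending-positions index of searchWord once, then walks resultWord
-- binary-searching each char's position list for the next usable position; same result.


-- ===== PORT A =====
-- A's for-loop over searchWord's characters, carrying the pointer ptr into resultWord.
def solLoopA (r : List Char) : List Char → Nat → Int
  | [], ptr => (r.length : Int) - (ptr : Int)
  | c :: s, ptr =>
      if ptr = r.length then 0
      else if c = PySem.List.pyGetD r (ptr : Int) ' ' then solLoopA r s (ptr + 1)
      else solLoopA r s ptr

def solution (searchWord : String) (resultWord : String) : Int :=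
  solLoopA resultWord.toList searchWord.toList 0

-- ===== PORT B =====
-- Source B's first loop: for i, c in enumerate(searchWord): positions.setdefault(c, []).append(i)
def buildPosB (s : List Char) : PySem.Dict Char (List Int) :=
  (PySem.List.enumerate s).foldl (fun d p => d.modify p.2 [] (· ++ [p.1])) PySem.Dict.empty

-- Source B's second loop over enumerate(resultWord), carrying pos.  Its hand-written
-- lo/hi while loop is exactly bisect_left(lst, pos) = PySem.List.bisectLeft (same loop).
-- lst[lo] with 0 ≤ lo < len(lst) (guarded just above) is List.getD lo 0 — exact there.
def solLoopB (n : Nat) (posd : PySem.Dict Char (List Int)) : List Char → Nat → Int → Int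
  | [], _, _ => 0
  | ch :: rt, i, pos =>
      let lst := posd.getD ch []
      let lo := PySem.List.bisectLeft lst pos
      if lo = lst.length then (n : Int) - (i : Int)
      else solLoopB n posd rt (i + 1) (lst.getD lo 0 + 1)

def solution_alt (searchWord : String) (resultWord : String) : Int :=
  solLoopB resultWord.toList.length (buildPosB searchWord.toList) resultWord.toList 0 0

-- ===== PRECONDITION & SPEC =====
def Spec_solution (searchWord : String) (resultWord : String) (out : Int) : Prop := out = solution_alt searchWord resultWord
instance (searchWord : String) (resultWord : String) (out : Int) : Decidable (Spec_solution searchWord resultWord out) := by unfold Spec_solution; infer_instance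

-- ===== CLAIM (what is proved, stated in full; the proofs are below) =====
def Claim_equal_solution : Prop := ∀ (searchWord : String) (resultWord : String), Dom_solution searchWord resultWord → Spec_solution searchWord resultWord (solution searchWord resultWord)

-- ===== LEMMAS AND PROOFS =====

-- Proof-side intermediate loop: walk resultWord consuming the remaining suffix of
-- searchWord linearly (first match and everything before it dropped).
def consumeC (ch : Char) : List Char → Option (List Char)
  | [] => none
  | c :: t => if c = ch then some t else consumeC ch t

def solLoopC (n : Nat) : List Char → Nat → List Char → Int
  | [], _, _ => 0
  | ch :: rt, i, it =>
      match consumeC ch it with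
      | none => (n : Int) - (i : Int)
      | some it' => solLoopC n rt (i + 1) it'

-- ---- A = C (A's pointer scan equals the consuming walk) ----

theorem solLoopC_skip (n : Nat) (ch c : Char) (rt : List Char) (i : Nat) (s : List Char)
    (h : ¬ c = ch) : solLoopC n (ch :: rt) i (c :: s) = solLoopC n (ch :: rt) i s := by
  simp [solLoopC, consumeC, h]

theorem solLoopA_eq_C (s : List Char) : ∀ (p r : List Char),
    solLoopA (p ++ r) s p.length = solLoopC (p ++ r).length r p.length s := by
  induction s with
  | nil =>
    intro p r
    cases r with
    | nil => simp [solLoopA, solLoopC]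
    | cons ch rt => simp [solLoopA, solLoopC, consumeC]
  | cons c s ih =>
    intro p r
    cases r with
    | nil => simp [solLoopA, solLoopC]
    | cons ch rt =>
      have hlt : p.length < (p ++ ch :: rt).length := by simp
      have hget : PySem.List.pyGetD (p ++ ch :: rt) (p.length : Int) ' ' = ch := by
        rw [PySem.List.pyGetD_natCast]
        simp [List.getD_eq_getElem?_getD]
      by_cases hc : c = ch
      · subst hc
        have := ih (p ++ [c]) rt
        simp only [List.append_assoc, List.singleton_append, List.length_append,
          List.length_singleton] at this
        simp [solLoopA, solLoopC, consumeC, hget, this]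
      · rw [solLoopC_skip _ _ _ _ _ _ hc]
        have := ih p (ch :: rt)
        simpa [solLoopA, Nat.ne_of_lt hlt, hget, hc] using this

-- ---- the index built by buildPosB ----

def occ (s : List Char) (ch : Char) : List Int :=
  ((PySem.List.enumerate s).filter (fun p => p.2 == ch)).map (fun p => p.1)

theorem buildPosB_getD (s : List Char) (ch : Char) :
    (buildPosB s).getD ch [] = occ s ch := by
  have hmap : (PySem.List.enumerate s).foldl
      (fun d p => d.modify p.2 [] (· ++ [p.1])) PySem.Dict.empty
      = ((PySem.List.enumerate s).map (fun p => (p.2, p.1))).foldl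
        (fun d q => d.modify q.1 [] (· ++ [q.2])) PySem.Dict.empty := by
    rw [List.foldl_map]
  rw [buildPosB, hmap, PySem.Dict.getD_foldl_modify_append]
  simp [occ, List.filter_map, Function.comp_def]

theorem occ_pairwise (s : List Char) (ch : Char) : (occ s ch).Pairwise (· < ·) := by
  unfold occ
  rw [List.pairwise_map]
  exact (PySem.List.pairwise_lt_enumerate s 0).filter _

theorem mem_occ_iff (s : List Char) (ch : Char) (x : Int) :
    x ∈ occ s ch ↔ ∃ (k : Nat) (h : k < s.length), x = (k : Int) ∧ s[k] = ch := by
  unfold occ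
  simp only [List.mem_map, List.mem_filter, PySem.List.mem_enumerate_iff]
  constructor
  · rintro ⟨p, ⟨⟨k, hk, rfl⟩, hc⟩, rfl⟩
    exact ⟨k, hk, by simp, by simpa using hc⟩
  · rintro ⟨k, hk, rfl, hc⟩
    exact ⟨((k : Int), s[k]), ⟨⟨k, hk, by simp⟩, by simpa using hc⟩, rfl⟩

-- ---- consuming walk vs. binary search on the index ----

theorem consumeC_eq_none_iff (ch : Char) (t : List Char) :
    consumeC ch t = none ↔ ch ∉ t := by
  induction t with
  | nil => simp [consumeC]
  | cons c t ih =>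
    by_cases h : c = ch
    · subst h; simp [consumeC]
    · simp [consumeC, h, ih, Ne.symm h]

theorem consumeC_drop (s : List Char) (ch : Char) (p j : Nat) (hpj : p ≤ j)
    (hj : j < s.length) (hch : s[j] = ch) (hmin : ∀ k (hk : k < s.length), p ≤ k → k < j → s[k] ≠ ch) :
    consumeC ch (s.drop p) = some (s.drop (j + 1)) := by
  have H : ∀ (d p : Nat), p ≤ j → j - p = d →
      (∀ k (hk : k < s.length), p ≤ k → k < j → s[k] ≠ ch) →
      consumeC ch (s.drop p) = some (s.drop (j + 1)) := by
    intro d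
    induction d with
    | zero =>
      intro p hpj hd _
      have hpj' : p = j := by omega
      subst hpj'
      rw [List.drop_eq_getElem_cons hj]
      simp [consumeC, hch]
    | succ d ih =>
      intro p hpj hd hmin
      have hp : p < j := by omega
      have hps : p < s.length := by omega
      have hne : ¬ s[p] = ch := hmin p hps le_rfl hp
      rw [List.drop_eq_getElem_cons hps]
      rw [show consumeC ch (s[p] :: s.drop (p + 1)) = consumeC ch (s.drop (p + 1)) by
        simp [consumeC, hne]]
      exact ih (p + 1) (by omega) (by omega)
        (fun k hk hpk hkj => hmin k hk (by omega) hkj)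
  exact H (j - p) p hpj rfl hmin

theorem solLoopB_eq_C (s : List Char) (n : Nat) (rt : List Char) : ∀ (i p : Nat),
    solLoopB n (buildPosB s) rt i (p : Int) = solLoopC n rt i (s.drop p) := by
  induction rt with
  | nil => intro i p; simp [solLoopB, solLoopC]
  | cons ch rt ih =>
    intro i p
    have hL : (buildPosB s).getD ch [] = occ s ch := buildPosB_getD s ch
    have hsorted : (occ s ch).Pairwise (· ≤ ·) := (occ_pairwise s ch).imp le_of_lt
    have hstrict := occ_pairwise s ch
    obtain ⟨hlen, hbelow, habove⟩ := PySem.List.bisectLeft_spec (occ s ch) (p : Int) hsorted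
    by_cases hcase : PySem.List.bisectLeft (occ s ch) (p : Int) = (occ s ch).length
    · -- every occurrence of ch is < p : ch is not in s.drop p
      have hnone : consumeC ch (s.drop p) = none := by
        rw [consumeC_eq_none_iff]
        intro hmem
        obtain ⟨k, hk, hgk⟩ := List.getElem_of_mem hmem
        rw [List.getElem_drop] at hgk
        have hk' : k < s.length - p := by simpa using hk
        have hx : ((p + k : Nat) : Int) ∈ occ s ch := by
          rw [mem_occ_iff]
          exact ⟨p + k, by omega, rfl, hgk⟩
        obtain ⟨idx, hidx, hgi⟩ := List.getElem_of_mem hx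
        have := hbelow idx hidx (by omega)
        rw [hgi] at this
        omega
      rw [show solLoopB n (buildPosB s) (ch :: rt) i (p : Int) = (n : Int) - (i : Int) by
        simp [solLoopB, hL, hcase]]
      simp [solLoopC, hnone]
    · have hlolt : PySem.List.bisectLeft (occ s ch) (p : Int) < (occ s ch).length :=
        lt_of_le_of_ne hlen hcase
      have hmemlo : (occ s ch)[PySem.List.bisectLeft (occ s ch) (p : Int)] ∈ occ s ch :=
        List.getElem_mem hlolt
      obtain ⟨k0, hk0, hk0eq, hk0ch⟩ := (mem_occ_iff s ch _).mp hmemlo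
      have hples : (p : Int) ≤ (occ s ch)[PySem.List.bisectLeft (occ s ch) (p : Int)] :=
        habove _ hlolt le_rfl
      have hpk0 : p ≤ k0 := by omega
      -- minimality of k0 among occurrences of ch at positions ≥ p
      have hmin : ∀ k (hk : k < s.length), p ≤ k → k < k0 → s[k] ≠ ch := by
        intro k hk hpk hkk0 hkc
        have hxk : ((k : Nat) : Int) ∈ occ s ch := by
          rw [mem_occ_iff]; exact ⟨k, hk, rfl, hkc⟩
        obtain ⟨idx, hidx, hgi⟩ := List.getElem_of_mem hxk
        rcases lt_trichotomy idx (PySem.List.bisectLeft (occ s ch) (p : Int)) with h | h | h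
        · have := hbelow idx hidx h
          rw [hgi] at this; omega
        · subst h
          have := hgi.symm.trans hk0eq
          omega
        · have := (List.pairwise_iff_getElem.mp hstrict) _ idx hlolt hidx h
          rw [hgi, hk0eq] at this; omega
      have hsome : consumeC ch (s.drop p) = some (s.drop (k0 + 1)) :=
        consumeC_drop s ch p k0 hpk0 hk0 hk0ch hmin
      have hgetD : (occ s ch).getD (PySem.List.bisectLeft (occ s ch) (p : Int)) 0 = (k0 : Int) := by
        rw [List.getD_eq_getElem _ _ hlolt, hk0eq]
      rw [show solLoopB n (buildPosB s) (ch :: rt) i (p : Int)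
            = solLoopB n (buildPosB s) rt (i + 1)
                ((occ s ch).getD (PySem.List.bisectLeft (occ s ch) (p : Int)) 0 + 1) by
        simp [solLoopB, hL, hcase]]
      rw [hgetD, show ((k0 : Int) + 1) = ((k0 + 1 : Nat) : Int) by push_cast; ring]
      rw [ih (i + 1) (k0 + 1)]
      simp [solLoopC, hsome]

-- ===== VERDICT (by name: the statement is the Claim_ definition above) =====
theorem solution_spec : Claim_equal_solution := by
  intro sw rw _
  unfold Spec_solution solution solution_alt
  have h1 := solLoopA_eq_C sw.toList [] rw.toList
  have h2 := solLoopB_eq_C sw.toList rw.toList.length rw.toList 0 0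
  simp only [List.nil_append, List.length_nil, Nat.cast_zero, List.drop_zero] at h1 h2
  rw [h1, ← h2]
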